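-- pv_equiv track=rewrite | github.com/eleanor-project/V8 | engine/runtime/critic_infrastructure.py | get_critic_priority
-- ===== SOURCE A (Python) =====
-- from typing import Any, Dict, List, Optional, TYPE_CHECKING
--
-- def get_critic_priority(critic_name: str, critic_ref: Any) -> int:
--     """
--     Automatically determine critic priority (1=highest, 10=lowest).
--
--     Based on name and safety criticality.
--     """
--     name_lower = critic_name.lower()
--
--     # Critical safety checks - highest priority
--     if any(keyword in name_lower for keyword in ["safety", "security", "critical"]):
--         return 1
--
--     # Rights and bias - high priority
--     if any(keyword in name_lower for keyword in ["rights", "bias", "discrimination"]):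
--         return 2
--
--     # Fairness and ethics - medium-high priority
--     if any(keyword in name_lower for keyword in ["fairness", "ethics", "harm"]):
--         return 3
--
--     # Privacy and compliance - medium priority
--     if any(keyword in name_lower for keyword in ["privacy", "pii", "compliance"]):
--         return 4
--
--     # Standard analysis - medium priority
--     if any(keyword in name_lower for keyword in ["analyze", "assess", "evaluate"]):
--         return 5
--
--     # Style and quality - lower priority
--     if any(keyword in name_lower for keyword in ["style", "quality", "format"]):
--         return 7
--
--     # Documentation and metadata - lowest priority
--     if any(keyword in name_lower for keyword in ["document", "metadata", "log"]):
--         return 9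
--
--     # Default: medium priority
--     return 5
-- ===== SOURCE B (Python) =====
-- # B: one-pass minimum-accumulator over a flat keyword->priority table (no early-return cascade)
-- KEYWORD_PRIORITIES = {
--     "safety": 1, "security": 1, "critical": 1,
--     "rights": 2, "bias": 2, "discrimination": 2,
--     "fairness": 3, "ethics": 3, "harm": 3,
--     "privacy": 4, "pii": 4, "compliance": 4,
--     "analyze": 5, "assess": 5, "evaluate": 5,
--     "style": 7, "quality": 7, "format": 7,
--     "document": 9, "metadata": 9, "log": 9,
-- }
--
-- def get_critic_priority(critic_name: str, critic_ref) -> int: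
--     name_lower = critic_name.lower()
--     best = None
--     for keyword, priority in KEYWORD_PRIORITIES.items():
--         if keyword in name_lower and (best is None or priority < best):
--             best = priority
--     return 5 if best is None else best
-- ===== Notes on version B (the rewrite author's own statement) =====
-- stated objective: alternative
-- what changed: Replaces the seven-branch early-return if-cascade with a single pass over a flat keyword->priority dict that keeps the minimum matched priority (default 5), relying on each cascade group having one constant priority.
import Mathlib
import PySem

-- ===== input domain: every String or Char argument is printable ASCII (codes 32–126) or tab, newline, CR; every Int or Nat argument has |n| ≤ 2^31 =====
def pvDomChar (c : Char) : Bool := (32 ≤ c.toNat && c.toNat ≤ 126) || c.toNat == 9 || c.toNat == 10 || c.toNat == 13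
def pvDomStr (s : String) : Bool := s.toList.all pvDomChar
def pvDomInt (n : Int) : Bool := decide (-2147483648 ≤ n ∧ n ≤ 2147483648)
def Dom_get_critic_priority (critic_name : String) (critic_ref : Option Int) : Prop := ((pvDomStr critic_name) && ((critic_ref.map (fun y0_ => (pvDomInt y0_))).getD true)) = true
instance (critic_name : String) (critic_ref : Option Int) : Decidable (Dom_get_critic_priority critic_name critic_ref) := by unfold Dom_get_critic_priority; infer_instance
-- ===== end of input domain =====

-- B replaces A's seven-branch early-return cascade by a single pass over a flat
-- keyword→priority table keeping the minimum matched priority (objective: alternative).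

-- ===== PORT A =====
def get_critic_priority (critic_name : String) (critic_ref : Option Int) : Int :=
  let name_lower := PySem.Str.lower critic_name
  if List.any ["safety", "security", "critical"] (fun kw => PySem.Str.isIn kw name_lower) then 1
  else if List.any ["rights", "bias", "discrimination"] (fun kw => PySem.Str.isIn kw name_lower) then 2
  else if List.any ["fairness", "ethics", "harm"] (fun kw => PySem.Str.isIn kw name_lower) then 3
  else if List.any ["privacy", "pii", "compliance"] (fun kw => PySem.Str.isIn kw name_lower) then 4
  else if List.any ["analyze", "assess", "evaluate"] (fun kw => PySem.Str.isIn kw name_lower) then 5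
  else if List.any ["style", "quality", "format"] (fun kw => PySem.Str.isIn kw name_lower) then 7
  else if List.any ["document", "metadata", "log"] (fun kw => PySem.Str.isIn kw name_lower) then 9
  else 5

-- ===== PORT B =====
-- the dict KEYWORD_PRIORITIES, as an association list in insertion order
def pvKeywordPriorities : List (String × Int) :=
  [("safety", 1), ("security", 1), ("critical", 1),
   ("rights", 2), ("bias", 2), ("discrimination", 2),
   ("fairness", 3), ("ethics", 3), ("harm", 3),
   ("privacy", 4), ("pii", 4), ("compliance", 4),
   ("analyze", 5), ("assess", 5), ("evaluate", 5),
   ("style", 7), ("quality", 7), ("format", 7),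
   ("document", 9), ("metadata", 9), ("log", 9)]

-- loop body: 'if keyword in name_lower and (best is None or priority < best): best = priority'
def pvStep (name_lower : String) (best : Option Int) (kp : String × Int) : Option Int :=
  if PySem.Str.isIn kp.1 name_lower &&
     (match best with | none => true | some b => decide (kp.2 < b)) then some kp.2 else best

def get_critic_priority_alt (critic_name : String) (critic_ref : Option Int) : Int :=
  let name_lower := PySem.Str.lower critic_name
  let best := List.foldl (pvStep name_lower) none pvKeywordPriorities
  match best with | none => 5 | some b => b

-- ===== PRECONDITION & SPEC =====
def Spec_get_critic_priority (critic_name : String) (critic_ref : Option Int) (out : Int) : Prop := out = get_critic_priority_alt critic_name critic_ref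
instance (critic_name : String) (critic_ref : Option Int) (out : Int) : Decidable (Spec_get_critic_priority critic_name critic_ref out) := by unfold Spec_get_critic_priority; infer_instance

-- ===== CLAIM (what is proved, stated in full; the proofs are below) =====
def Claim_equal_get_critic_priority : Prop := ∀ (critic_name : String) (critic_ref : Option Int), Dom_get_critic_priority critic_name critic_ref → Spec_get_critic_priority critic_name critic_ref (get_critic_priority critic_name critic_ref)

-- ===== LEMMAS AND PROOFS =====

-- result of folding one keyword group (all mapped to the same priority p) through pvStep
def pvGroupRes (p : Int) (acc : Option Int) : Option Int :=
  match acc with | none => some p | some b => if p < b then some p else some b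

lemma pvStep_map_const (nm : String) (k : String) (p : Int) (acc : Option Int) :
    pvStep nm acc (k, p) = if PySem.Str.isIn k nm then pvGroupRes p acc else acc := by
  rcases acc with _ | b
  · by_cases h : PySem.Str.isIn k nm <;> simp [pvStep, pvGroupRes, h]
  · by_cases h : PySem.Str.isIn k nm <;> by_cases h2 : p < b <;>
      simp [pvStep, pvGroupRes, h, h2]

lemma pvGroupRes_idem (p : Int) (acc : Option Int) :
    pvGroupRes p (pvGroupRes p acc) = pvGroupRes p acc := by
  rcases acc with _ | b
  · simp [pvGroupRes]
  · by_cases h : p < b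
    · rw [show pvGroupRes p (some b) = some p by simp [pvGroupRes, h]]
      simp [pvGroupRes, h, lt_irrefl]
    · rw [show pvGroupRes p (some b) = some b by simp [pvGroupRes, h]]
      simp [pvGroupRes, h]

lemma pvFold_group (nm : String) (ks : List String) (p : Int) (acc : Option Int) :
    List.foldl (pvStep nm) acc (ks.map (fun k => (k, p))) =
      if List.any ks (fun kw => PySem.Str.isIn kw nm) then pvGroupRes p acc else acc := by
  induction ks generalizing acc with
  | nil => simp
  | cons k ks ih =>
    simp only [List.map_cons, List.foldl_cons, pvStep_map_const, List.any_cons]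
    by_cases h : PySem.Str.isIn k nm = true
    · rw [if_pos h, ih]
      by_cases h2 : List.any ks (fun kw => PySem.Str.isIn kw nm) = true
      · rw [if_pos h2, if_pos (by rw [Bool.or_eq_true]; exact Or.inl h), pvGroupRes_idem]
      · rw [if_neg h2, if_pos (by rw [Bool.or_eq_true]; exact Or.inl h)]
    · rw [if_neg h, ih]
      by_cases h2 : List.any ks (fun kw => PySem.Str.isIn kw nm) = true
      · rw [if_pos h2, if_pos (by rw [Bool.or_eq_true]; exact Or.inr h2)]
      · rw [if_neg h2, if_neg (by rw [Bool.or_eq_true]; tauto)]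

lemma pvKeywordPriorities_eq :
    pvKeywordPriorities =
      (["safety", "security", "critical"].map (fun k => (k, (1 : Int)))) ++
      (["rights", "bias", "discrimination"].map (fun k => (k, (2 : Int)))) ++
      (["fairness", "ethics", "harm"].map (fun k => (k, (3 : Int)))) ++
      (["privacy", "pii", "compliance"].map (fun k => (k, (4 : Int)))) ++
      (["analyze", "assess", "evaluate"].map (fun k => (k, (5 : Int)))) ++
      (["style", "quality", "format"].map (fun k => (k, (7 : Int)))) ++
      (["document", "metadata", "log"].map (fun k => (k, (9 : Int)))) := rfl

-- ===== VERDICT (by name: the statement is the Claim_ definition above) =====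
theorem get_critic_priority_spec : Claim_equal_get_critic_priority := by
  intro critic_name critic_ref _
  unfold Spec_get_critic_priority get_critic_priority get_critic_priority_alt
  rw [pvKeywordPriorities_eq]
  simp only [List.foldl_append, pvFold_group]
  generalize (List.any ["safety", "security", "critical"] (fun kw => PySem.Str.isIn kw (PySem.Str.lower critic_name))) = g1
  generalize (List.any ["rights", "bias", "discrimination"] (fun kw => PySem.Str.isIn kw (PySem.Str.lower critic_name))) = g2
  generalize (List.any ["fairness", "ethics", "harm"] (fun kw => PySem.Str.isIn kw (PySem.Str.lower critic_name))) = g3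
  generalize (List.any ["privacy", "pii", "compliance"] (fun kw => PySem.Str.isIn kw (PySem.Str.lower critic_name))) = g4
  generalize (List.any ["analyze", "assess", "evaluate"] (fun kw => PySem.Str.isIn kw (PySem.Str.lower critic_name))) = g5
  generalize (List.any ["style", "quality", "format"] (fun kw => PySem.Str.isIn kw (PySem.Str.lower critic_name))) = g6
  generalize (List.any ["document", "metadata", "log"] (fun kw => PySem.Str.isIn kw (PySem.Str.lower critic_name))) = g7
  revert g1 g2 g3 g4 g5 g6 g7
  decide
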